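-- pv_equiv track=rewrite | github.com/bengsucakmak/Analist-Agent-Toolcalling | tools/planner.py | _time_column
-- ===== SOURCE A (Python) =====
-- from typing import Optional, Dict, List, Tuple, Set
--
-- def _time_column(columns_map: Dict[str, List[Tuple[str,str]]], table: str) -> Optional[str]:
--     prefer = ["created_at", "createdat", "create_time", "timestamp", "ts", "date", "dt", "time"]
--     names = [c for c,_ in columns_map[table]]
--     for p in prefer:
--         for n in names:
--             if p == n.lower(): return n
--     for n in names:
--         if any(k in n.lower() for k in ["date","time","ts","created"]): return n
--     return None
-- ===== SOURCE B (Python) =====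
-- def _time_column(columns_map, table):
--     prefer = ["created_at", "createdat", "create_time", "timestamp", "ts", "date", "dt", "time"]
--     rank = {name: i for i, name in enumerate(prefer)}
--     best = None
--     best_r = len(prefer)
--     for c, _ in columns_map[table]:
--         r = rank.get(c.lower(), len(prefer))
--         if r < best_r:
--             best, best_r = c, r
--     if best_r < len(prefer):
--         return best
--     for c, _ in columns_map[table]:
--         low = c.lower()
--         if "date" in low or "time" in low or "ts" in low or "created" in low:
--             return c
--     return None
-- ===== Notes on version B (the rewrite author's own statement) =====
-- stated objective: alternative
-- what changed: Replaces A's nested prefer-by-names scan with a precomputed rank dictionary and a single min-rank pass over the columns (strict < so the earliest column wins ties), keeping the substring fallback.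
import Mathlib
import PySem

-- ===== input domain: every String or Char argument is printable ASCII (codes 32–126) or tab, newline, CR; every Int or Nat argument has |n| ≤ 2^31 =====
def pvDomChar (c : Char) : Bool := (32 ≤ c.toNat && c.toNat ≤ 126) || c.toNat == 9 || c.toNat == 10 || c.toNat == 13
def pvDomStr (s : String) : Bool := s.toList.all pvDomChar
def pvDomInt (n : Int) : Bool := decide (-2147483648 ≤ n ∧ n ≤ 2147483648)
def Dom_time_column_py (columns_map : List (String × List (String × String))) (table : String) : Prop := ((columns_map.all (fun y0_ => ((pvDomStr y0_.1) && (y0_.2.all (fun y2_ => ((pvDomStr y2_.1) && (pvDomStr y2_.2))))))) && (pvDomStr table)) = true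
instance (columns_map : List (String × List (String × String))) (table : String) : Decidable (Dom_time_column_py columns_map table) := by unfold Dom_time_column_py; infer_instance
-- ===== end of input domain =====

-- ===== PORT A =====
-- B replaces A's nested prefer-by-names scan with a rank dictionary and one min-rank pass (alternative decomposition, same results).
def preferList : List String := ["created_at", "createdat", "create_time", "timestamp", "ts", "date", "dt", "time"]

def kwList : List String := ["date", "time", "ts", "created"]

-- inner 'for n in names: if p == n.lower(): return n'
def innerA (p : String) : List String → Option String
  | [] => none
  | n :: ns => if p == PySem.Str.lower n then some n else innerA p ns

-- outer 'for p in prefer: …'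
def outerA (names : List String) : List String → Option String
  | [] => none
  | p :: ps =>
    match innerA p names with
    | some n => some n
    | none => outerA names ps

-- 'for n in names: if any(k in n.lower() for k in [...]): return n'
def fallbackA : List String → Option String
  | [] => none
  | n :: ns => if kwList.any (fun k => PySem.Str.isIn k (PySem.Str.lower n)) then some n else fallbackA ns

def time_column_py (columns_map : List (String × List (String × String))) (table : String) : Option String :=
  match (PySem.Dict.mk columns_map).get? table with
  | none => none   -- Python raises KeyError here; excluded by Pre_
  | some cols =>
    let names := cols.map (fun c => c.1)
    match outerA names preferList with
    | some n => some n
    | none => fallbackA names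

-- ===== PORT B =====
-- rank = {name: i for i, name in enumerate(prefer)}
def rankDict : PySem.Dict String Int :=
  (PySem.List.enumerate preferList 0).foldl (fun d p => d.insert p.2 (p.1 : Int)) PySem.Dict.empty

-- single pass: r = rank.get(c.lower(), len(prefer)); keep strictly smaller r
def scanB : List (String × String) → Option String × Int → Option String × Int
  | [], st => st
  | c :: rest, (best, bestR) =>
    let r := rankDict.getD (PySem.Str.lower c.1) (preferList.length : Int)
    if r < bestR then scanB rest (some c.1, r) else scanB rest (best, bestR)

-- 'for c, _ in …: low = c.lower(); if "date" in low or …: return c'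
def fallbackB : List (String × String) → Option String
  | [] => none
  | c :: rest =>
    let low := PySem.Str.lower c.1
    if PySem.Str.isIn "date" low || PySem.Str.isIn "time" low || PySem.Str.isIn "ts" low || PySem.Str.isIn "created" low
    then some c.1 else fallbackB rest

def time_column_py_alt (columns_map : List (String × List (String × String))) (table : String) : Option String :=
  match (PySem.Dict.mk columns_map).get? table with
  | none => none   -- Python raises KeyError here; excluded by Pre_
  | some cols =>
    let st := scanB cols (none, (preferList.length : Int))
    if st.2 < (preferList.length : Int) then st.1 else fallbackB cols

-- ===== PRECONDITION & SPEC =====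
-- Python A raises KeyError when 'table' is not a key of columns_map; exactly those inputs are excluded.
def Pre_time_column_py (columns_map : List (String × List (String × String))) (table : String) : Prop :=
  (PySem.Dict.mk columns_map).contains table = true
instance (columns_map : List (String × List (String × String))) (table : String) : Decidable (Pre_time_column_py columns_map table) := by unfold Pre_time_column_py; infer_instance

def pvWitness_time_column_py : (List (String × List (String × String))) × String :=
  ([("t", [("id", "INTEGER"), ("created_at", "TEXT")])], "t")

def Spec_time_column_py (columns_map : List (String × List (String × String))) (table : String) (out : Option String) : Prop := out = time_column_py_alt columns_map table
instance (columns_map : List (String × List (String × String))) (table : String) (out : Option String) : Decidable (Spec_time_column_py columns_map table out) := by unfold Spec_time_column_py; infer_instance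

-- ===== CLAIM (what is proved, stated in full; the proofs are below) =====
def Claim_equal_time_column_py : Prop := ∀ (columns_map : List (String × List (String × String))) (table : String), Dom_time_column_py columns_map table → Pre_time_column_py columns_map table → Spec_time_column_py columns_map table (time_column_py columns_map table)

-- ===== LEMMAS AND PROOFS =====

-- rank of a lowered name in a prefix list: 0 at the head, +1 per step, |L| if absent
def rkIdx (s : String) : List String → Int
  | [] => 0
  | p :: ps => if s = p then 0 else rkIdx s ps + 1

-- scanB with an abstract rank function (proof vehicle)
def scanG (f : String → Int) : List (String × String) → Option String × Int → Option String × Int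
  | [], st => st
  | c :: rest, (best, bestR) =>
    if f c.1 < bestR then scanG f rest (some c.1, f c.1) else scanG f rest (best, bestR)

lemma rkIdx_nonneg (s : String) (L : List String) : 0 ≤ rkIdx s L := by
  induction L with
  | nil => simp [rkIdx]
  | cons p ps ih => simp only [rkIdx]; split <;> omega

lemma rankDict_getD (s : String) :
    rankDict.getD s (preferList.length : Int) = rkIdx s preferList := by
  have h : rankDict = PySem.Dict.mk [("created_at", (0:Int)), ("createdat", 1), ("create_time", 2), ("timestamp", 3), ("ts", 4), ("date", 5), ("dt", 6), ("time", 7)] := by decide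
  rw [h, PySem.Dict.getD_eq_get?_getD]
  by_cases h1 : s = "created_at"
  · subst h1; decide
  by_cases h2 : s = "createdat"
  · subst h2; decide
  by_cases h3 : s = "create_time"
  · subst h3; decide
  by_cases h4 : s = "timestamp"
  · subst h4; decide
  by_cases h5 : s = "ts"
  · subst h5; decide
  by_cases h6 : s = "date"
  · subst h6; decide
  by_cases h7 : s = "dt"
  · subst h7; decide
  by_cases h8 : s = "time"
  · subst h8; decide
  simp only [PySem.Dict.get?_mk_cons, preferList, rkIdx, beq_iff_eq,
    if_neg (Ne.symm h1), if_neg (Ne.symm h2), if_neg (Ne.symm h3), if_neg (Ne.symm h4),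
    if_neg (Ne.symm h5), if_neg (Ne.symm h6), if_neg (Ne.symm h7), if_neg (Ne.symm h8),
    if_neg h1, if_neg h2, if_neg h3, if_neg h4, if_neg h5, if_neg h6, if_neg h7, if_neg h8]
  norm_num
  rfl

lemma scanB_eq_scanG (cols : List (String × String)) (st : Option String × Int) :
    scanB cols st = scanG (fun c => rkIdx (PySem.Str.lower c) preferList) cols st := by
  induction cols generalizing st with
  | nil => rfl
  | cons c rest ih =>
    obtain ⟨b, br⟩ := st
    simp only [scanB, scanG, rankDict_getD]
    split <;> exact ih _

lemma scanG_no_update (f : String → Int) (cols : List (String × String)) (st : Option String × Int)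
    (h : ∀ c ∈ cols, ¬ f c.1 < st.2) : scanG f cols st = st := by
  induction cols with
  | nil => rfl
  | cons c rest ih =>
    obtain ⟨b, br⟩ := st
    simp only [scanG]
    rw [if_neg (h c (by simp))]
    exact ih (fun c hc => h c (by simp [hc]))

lemma scanG_first_zero (f : String → Int) (h0 : ∀ c, 0 ≤ f c) :
    ∀ (cols : List (String × String)) (b : Option String) (br : Int), 0 < br →
    ∀ c0, cols.find? (fun c => f c.1 == 0) = some c0 →
    scanG f cols (b, br) = (some c0.1, 0) := by
  intro cols
  induction cols with
  | nil => intro b br _ c0 h; simp at h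
  | cons c rest ih =>
    intro b br hbr c0 hfind
    by_cases hc : f c.1 = 0
    · rw [List.find?_cons_of_pos (by simpa using hc)] at hfind
      cases hfind
      simp only [scanG]
      rw [if_pos (by omega)]
      rw [hc]
      exact scanG_no_update f rest (some c.1, 0) (fun c' _ => by have := h0 c'.1; simp; omega)
    · rw [List.find?_cons_of_neg (by simpa using hc)] at hfind
      have hpos : 0 < f c.1 := lt_of_le_of_ne (h0 c.1) (Ne.symm hc)
      simp only [scanG]
      split
      · exact ih _ _ hpos c0 hfind
      · exact ih _ _ hbr c0 hfind

lemma scanG_shift (f g : String → Int) :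
    ∀ (cols : List (String × String)) (b : Option String) (br : Int),
    (∀ c ∈ cols, g c.1 = f c.1 + 1) →
    scanG g cols (b, br + 1) = ((scanG f cols (b, br)).1, (scanG f cols (b, br)).2 + 1) := by
  intro cols
  induction cols with
  | nil => intro b br _; rfl
  | cons c rest ih =>
    intro b br h
    have hc := h c (by simp)
    simp only [scanG, hc]
    by_cases hlt : f c.1 < br
    · rw [if_pos (by omega), if_pos hlt]
      exact ih _ _ (fun c' hc' => h c' (by simp [hc']))
    · rw [if_neg (by omega), if_neg hlt]
      exact ih _ _ (fun c' hc' => h c' (by simp [hc']))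

lemma innerA_eq_find (p : String) (cols : List (String × String)) :
    innerA p (cols.map (fun c => c.1)) = (cols.find? (fun c => p == PySem.Str.lower c.1)).map (fun c => c.1) := by
  induction cols with
  | nil => rfl
  | cons c rest ih =>
    simp only [List.map, innerA, List.find?]
    by_cases h : p == PySem.Str.lower c.1
    · simp [h]
    · simp only [Bool.not_eq_true] at h; simp [h, ih]

lemma fallbackB_eq (cols : List (String × String)) :
    fallbackB cols = fallbackA (cols.map (fun c => c.1)) := by
  induction cols with
  | nil => rfl
  | cons c rest ih =>
    simp only [fallbackB, fallbackA, List.map, kwList, List.any]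
    split
    next h => rw [if_pos (by revert h; simp; tauto)]
    next h => rw [if_neg (by revert h; simp; tauto)]; exact ih

lemma rkIdx_cons_eq_zero_iff (s p : String) (ps : List String) :
    rkIdx s (p :: ps) = 0 ↔ s = p := by
  simp only [rkIdx]
  split
  · simp_all
  · have := rkIdx_nonneg s ps; constructor <;> intro h <;> [omega; simp_all]

lemma main_loop (L : List String) (cols : List (String × String)) :
    (match outerA (cols.map (fun c => c.1)) L with
     | some n => some n
     | none => fallbackA (cols.map (fun c => c.1))) =
    (if (scanG (fun c => rkIdx (PySem.Str.lower c) L) cols (none, (L.length : Int))).2 < (L.length : Int)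
     then (scanG (fun c => rkIdx (PySem.Str.lower c) L) cols (none, (L.length : Int))).1
     else fallbackA (cols.map (fun c => c.1))) := by
  induction L with
  | nil =>
    rw [scanG_no_update _ _ _ (fun c _ => by simp [rkIdx])]
    simp [outerA]
  | cons p ps ih =>
    have hpred : (fun c : String × String => p == PySem.Str.lower c.1) =
        (fun c : String × String => rkIdx (PySem.Str.lower c.1) (p :: ps) == 0) := by
      funext c
      rw [Bool.eq_iff_iff]
      simp only [beq_iff_eq, rkIdx_cons_eq_zero_iff]
      exact eq_comm
    cases hinner : innerA p (cols.map fun c => c.1) with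
    | some n =>
      rw [innerA_eq_find, hpred] at hinner
      obtain ⟨c0, hc0, hn⟩ : ∃ c0, cols.find? (fun c : String × String => rkIdx (PySem.Str.lower c.1) (p :: ps) == 0) = some c0 ∧ n = c0.1 := by
        cases h' : cols.find? (fun c : String × String => rkIdx (PySem.Str.lower c.1) (p :: ps) == 0) with
        | none => rw [h'] at hinner; simp at hinner
        | some c0 => rw [h'] at hinner; exact ⟨c0, rfl, by simpa using hinner.symm⟩
      rw [scanG_first_zero _ (fun c => rkIdx_nonneg _ _) cols none _ (by simp only [List.length_cons]; push_cast; omega) c0 hc0]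
      simp only [outerA, innerA_eq_find, hpred, hc0]
      rw [if_pos (by simp only [List.length_cons]; push_cast; omega)]
      simp
    | none =>
      rw [innerA_eq_find, hpred] at hinner
      have hfind : cols.find? (fun c : String × String => rkIdx (PySem.Str.lower c.1) (p :: ps) == 0) = none := by
        cases h' : cols.find? (fun c : String × String => rkIdx (PySem.Str.lower c.1) (p :: ps) == 0) <;> rw [h'] at hinner <;> simp_all
      have hall : ∀ c ∈ cols, rkIdx (PySem.Str.lower c.1) (p :: ps) = rkIdx (PySem.Str.lower c.1) ps + 1 := by
        intro c hc
        have := List.find?_eq_none.mp hfind c hc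
        simp only [beq_iff_eq] at this
        simp only [rkIdx]
        rw [if_neg]
        intro h
        exact this (by rw [rkIdx_cons_eq_zero_iff]; exact h)
      have hcast : ((p :: ps).length : Int) = (ps.length : Int) + 1 := by simp
      rw [hcast, scanG_shift (fun c => rkIdx (PySem.Str.lower c) ps) _ cols none _ hall]
      simp only [outerA, innerA_eq_find, hpred, hfind, Option.map_none]
      simp only [add_lt_add_iff_right]
      rcases ih with ih
      by_cases hlt : (scanG (fun c => rkIdx (PySem.Str.lower c) ps) cols (none, (ps.length : Int))).2 < (ps.length : Int)
      · rw [if_pos hlt]; rw [if_pos hlt] at ih; exact ih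
      · rw [if_neg hlt]; rw [if_neg hlt] at ih; exact ih

-- ===== VERDICT (by name: the statement is the Claim_ definition above) =====
theorem time_column_py_spec : Claim_equal_time_column_py := by
  intro cm table _ hpre
  unfold Spec_time_column_py time_column_py time_column_py_alt
  obtain ⟨cols, hcols⟩ : ∃ cols, (PySem.Dict.mk cm).get? table = some cols := by
    unfold Pre_time_column_py at hpre
    rw [PySem.Dict.contains_eq_isSome_get?] at hpre
    exact Option.isSome_iff_exists.mp hpre
  rw [hcols]
  simp only []
  rw [scanB_eq_scanG, fallbackB_eq]
  exact main_loop preferList cols
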